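-- pv_equiv track=rewrite | github.com/dietmarja/ECM | components/curriculum_generator/components/enhanced_profile_builder_fixed.py | _generate_learning_sequence
-- ===== SOURCE A (Python) =====
-- from typing import Dict, Any, List, Optional
--
-- def _generate_learning_sequence(competencies: List[Dict]) -> List[str]:
--     """Generate logical learning sequence for competencies"""
--     # Simple heuristic: foundational -> technical -> applied
--     foundational = []
--     technical = []
--     applied = []
--
--     for comp in competencies:
--         comp_name = comp['competency_name']
--         if 'understanding' in comp_name.lower() or 'principles' in comp_name.lower():
--             foundational.append(comp_name)
--         elif 'advanced' in comp_name.lower() or 'analytics' in comp_name.lower():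
--             technical.append(comp_name)
--         else:
--             applied.append(comp_name)
--
--     return foundational + technical + applied
-- ===== SOURCE B (Python) =====
-- from typing import Dict, List
--
-- def _priority(comp: Dict) -> int:
--     name = comp['competency_name'].lower()
--     if 'understanding' in name or 'principles' in name:
--         return 0
--     if 'advanced' in name or 'analytics' in name:
--         return 1
--     return 2
--
-- def _generate_learning_sequence(competencies: List[Dict]) -> List[str]:
--     return [c['competency_name'] for c in sorted(competencies, key=_priority)]
-- ===== Notes on version B (the rewrite author's own statement) =====
-- stated objective: alternative
-- what changed: Replaces A's three-bucket partition-and-concatenate loop by a single stable sort on a {0,1,2} priority key derived from the same substring tests, relying on sort stability to preserve within-group order.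
import Mathlib
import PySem

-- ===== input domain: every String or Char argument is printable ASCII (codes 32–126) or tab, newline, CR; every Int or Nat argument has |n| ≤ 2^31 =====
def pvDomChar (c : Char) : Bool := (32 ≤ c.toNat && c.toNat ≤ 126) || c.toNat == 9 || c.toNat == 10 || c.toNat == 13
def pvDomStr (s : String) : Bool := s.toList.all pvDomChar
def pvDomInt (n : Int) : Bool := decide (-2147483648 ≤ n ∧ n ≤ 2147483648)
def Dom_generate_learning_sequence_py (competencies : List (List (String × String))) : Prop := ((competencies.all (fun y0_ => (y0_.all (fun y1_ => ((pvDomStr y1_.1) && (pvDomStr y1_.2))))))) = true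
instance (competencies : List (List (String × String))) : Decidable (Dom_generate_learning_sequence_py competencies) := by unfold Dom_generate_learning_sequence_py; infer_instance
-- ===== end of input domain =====

-- B replaces A's three-bucket partition-and-concatenate by a single stable key sort (same O(n) scan cost dominated
-- by the substring tests; objective: alternative algorithm, not speed).

-- shared helpers (both Pythons compute exactly these values):
-- comp['competency_name'] (Pre_ guarantees the key is present, so getD "" is never the fallback)
def pvName (comp : List (String × String)) : String := ((PySem.Dict.mk comp).get? "competency_name").getD ""
-- 'understanding' in name.lower() or 'principles' in name.lower()
def pvCond0 (comp : List (String × String)) : Bool :=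
  PySem.Str.isIn "understanding" (PySem.Str.lower (pvName comp)) || PySem.Str.isIn "principles" (PySem.Str.lower (pvName comp))
-- 'advanced' in name.lower() or 'analytics' in name.lower()
def pvCond1 (comp : List (String × String)) : Bool :=
  PySem.Str.isIn "advanced" (PySem.Str.lower (pvName comp)) || PySem.Str.isIn "analytics" (PySem.Str.lower (pvName comp))

-- ===== PORT A =====
def generate_learning_sequence_py (competencies : List (List (String × String))) : List String :=
  let st := competencies.foldl
    (fun (st : List String × List String × List String) comp =>
      if pvCond0 comp then (st.1 ++ [pvName comp], st.2.1, st.2.2)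
      else if pvCond1 comp then (st.1, st.2.1 ++ [pvName comp], st.2.2)
      else (st.1, st.2.1, st.2.2 ++ [pvName comp]))
    ([], [], [])
  st.1 ++ st.2.1 ++ st.2.2

-- ===== PORT B =====
def pvPriority (comp : List (String × String)) : Int :=
  if pvCond0 comp then 0 else if pvCond1 comp then 1 else 2

def generate_learning_sequence_py_alt (competencies : List (List (String × String))) : List String :=
  (PySem.List.sorted competencies pvPriority).map pvName

-- ===== PRECONDITION & SPEC =====
-- Pre_ excludes exactly the dicts missing the 'competency_name' key, on which Python A raises KeyError.
def Pre_generate_learning_sequence_py (competencies : List (List (String × String))) : Prop :=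
  ∀ comp ∈ competencies, ((PySem.Dict.mk comp).get? "competency_name").isSome
instance (competencies : List (List (String × String))) : Decidable (Pre_generate_learning_sequence_py competencies) := by unfold Pre_generate_learning_sequence_py; infer_instance
def pvWitness_generate_learning_sequence_py : (List (List (String × String))) :=
  [[("competency_name", "Advanced Analytics")], [("competency_name", "Understanding Data")]]

def Spec_generate_learning_sequence_py (competencies : List (List (String × String))) (out : List String) : Prop := out = generate_learning_sequence_py_alt competencies
instance (competencies : List (List (String × String))) (out : List String) : Decidable (Spec_generate_learning_sequence_py competencies out) := by unfold Spec_generate_learning_sequence_py; infer_instance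

-- ===== CLAIM (what is proved, stated in full; the proofs are below) =====
def Claim_equal_generate_learning_sequence_py : Prop := ∀ (competencies : List (List (String × String))), Dom_generate_learning_sequence_py competencies → Pre_generate_learning_sequence_py competencies → Spec_generate_learning_sequence_py competencies (generate_learning_sequence_py competencies)

-- ===== LEMMAS AND PROOFS =====

-- skip a prefix in which nothing goes before x
theorem insertBy_append_of_not_before {α : Type} (before : α → α → Bool) (x : α) (A B : List α)
    (h : ∀ a ∈ A, before x a = false) :
    PySem.List.insertBy before x (A ++ B) = A ++ PySem.List.insertBy before x B := by
  induction A with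
  | nil => rfl
  | cons a as ih =>
    simp only [List.cons_append, PySem.List.insertBy, h a (by simp)]
    simp only [Bool.false_eq_true, if_false, List.cons.injEq, true_and]
    exact ih (fun a ha => h a (by simp [ha]))

-- insert at the very front when everything goes after x
theorem insertBy_eq_cons_of_before {α : Type} (before : α → α → Bool) (x : α) (B : List α)
    (h : ∀ b ∈ B, before x b = true) :
    PySem.List.insertBy before x B = x :: B := by
  cases B with
  | nil => rfl
  | cons b bs => simp [PySem.List.insertBy, h b (by simp)]

theorem pvPriority_mem_filter (x : List (String × String)) (i : Int) (xs : List (List (String × String)))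
    (hx : x ∈ xs.filter (fun c => pvPriority c = i)) : pvPriority x = i := by
  simp only [List.mem_filter, decide_eq_true_eq] at hx
  exact hx.2

-- the stable sort by a {0,1,2}-valued key is the three filters concatenated
theorem sorted_priority_eq_filters (xs : List (List (String × String))) :
    PySem.List.sorted xs pvPriority =
      xs.filter (fun c => pvPriority c = 0) ++ xs.filter (fun c => pvPriority c = 1)
        ++ xs.filter (fun c => pvPriority c = 2) := by
  rw [PySem.List.sorted_eq_foldl_insertBy]
  induction xs using List.reverseRecOn with
  | nil => rfl
  | append_singleton ys x ih =>
    rw [List.foldl_append, List.foldl_cons, List.foldl_nil, ih]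
    have h2 : pvPriority x = 0 ∨ pvPriority x = 1 ∨ pvPriority x = 2 := by
      unfold pvPriority; split_ifs <;> simp
    have hfilter : ∀ (i : Int), (ys ++ [x]).filter (fun c => pvPriority c = i) =
        ys.filter (fun c => pvPriority c = i) ++ if pvPriority x = i then [x] else [] := by
      intro i; rw [List.filter_append, List.filter_singleton]
      by_cases h : pvPriority x = i <;> simp [h]
    rw [hfilter 0, hfilter 1, hfilter 2]
    have m0 : ∀ a ∈ ys.filter (fun c => pvPriority c = 0), pvPriority a = 0 :=
      fun a ha => pvPriority_mem_filter a 0 ys ha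
    have m1 : ∀ a ∈ ys.filter (fun c => pvPriority c = 1), pvPriority a = 1 :=
      fun a ha => pvPriority_mem_filter a 1 ys ha
    have m2 : ∀ a ∈ ys.filter (fun c => pvPriority c = 2), pvPriority a = 2 :=
      fun a ha => pvPriority_mem_filter a 2 ys ha
    rcases h2 with h | h | h
    · rw [List.append_assoc,
        insertBy_append_of_not_before _ x _ _ (fun a ha => by simp [m0 a ha, h]),
        insertBy_eq_cons_of_before _ x _ (fun b hb => by
          rcases List.mem_append.1 hb with hb | hb
          · simp [m1 b hb, h]
          · simp [m2 b hb, h])]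
      simp [h]
    · rw [List.append_assoc,
        insertBy_append_of_not_before _ x _ _ (fun a ha => by simp [m0 a ha, h]),
        insertBy_append_of_not_before _ x _ _ (fun a ha => by simp [m1 a ha, h]),
        insertBy_eq_cons_of_before _ x _ (fun b hb => by simp [m2 b hb, h])]
      simp [h]
    · rw [PySem.List.insertBy_of_forall_not_before _ x _ (fun a ha => by
        rcases List.mem_append.1 ha with ha | ha
        · rcases List.mem_append.1 ha with ha | ha
          · simp [m0 a ha, h]
          · simp [m1 a ha, h]
        · simp [m2 a ha, h])]
      simp [h]

-- A's three-accumulator fold, characterised by the same three filters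
theorem foldlA_eq (xs : List (List (String × String))) (a b c : List String) :
    xs.foldl
      (fun (st : List String × List String × List String) comp =>
        if pvCond0 comp then (st.1 ++ [pvName comp], st.2.1, st.2.2)
        else if pvCond1 comp then (st.1, st.2.1 ++ [pvName comp], st.2.2)
        else (st.1, st.2.1, st.2.2 ++ [pvName comp])) (a, b, c) =
      (a ++ (xs.filter (fun c => pvPriority c = 0)).map pvName,
       b ++ (xs.filter (fun c => pvPriority c = 1)).map pvName,
       c ++ (xs.filter (fun c => pvPriority c = 2)).map pvName) := by
  induction xs generalizing a b c with
  | nil => simp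
  | cons x xs ih =>
    by_cases h0 : pvCond0 x
    · simp [List.filter, pvPriority, h0, ih]
    · by_cases h1 : pvCond1 x
      · simp [List.filter, pvPriority, h0, h1, ih]
      · simp [List.filter, pvPriority, h0, h1, ih]

-- ===== VERDICT (by name: the statement is the Claim_ definition above) =====
theorem generate_learning_sequence_py_spec : Claim_equal_generate_learning_sequence_py := by
  intro competencies _ _
  unfold Spec_generate_learning_sequence_py generate_learning_sequence_py generate_learning_sequence_py_alt
  rw [sorted_priority_eq_filters, foldlA_eq]
  simp
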